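-- pv_equiv track=rewrite | github.com/aadityaraj2532/Search-Engine-Project | Project2/simhash.py | BitArray
-- ===== SOURCE A (Python) =====
-- def charAdd(currVal, currPow, ch):
--     b = 53
--     last = 1 << 64
--     asciNum = ord(ch)
--     newVal = (currVal + asciNum * currPow) & (last - 1)
--     newPow = (currPow * b) & (last - 1)
--     return newVal, newPow
--
-- def polyHash(word):
--     val = 0
--     pow = 1
--     for letter in word:
--         val, pow = charAdd(val, pow, letter)
--     return val
--
-- def BitArray(freqWord):
--     bit = [0] * 64
--     for word, freq in freqWord.items():
--         Wordhash = polyHash(word)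
--         i = 0
--         while i < 64:
--             bitVal = Wordhash & (1 << i)
--             if bitVal != 0:
--                 bit[i] = bit[i] + freq
--             else:
--                 bit[i] = bit[i] - freq
--             i = i + 1
--     return bit
-- ===== SOURCE B (Python) =====
-- def BitArray(freqWord):
--     total = sum(freqWord.values())
--     mask = (1 << 64) - 1
--     bit = [0] * 64
--     for word, freq in freqWord.items():
--         h = sum(ord(c) * 53 ** i for i, c in enumerate(word)) & mask
--         for i in range(64):
--             if (h >> i) & 1:
--                 bit[i] += 2 * freq
--     return [b - total for b in bit]
-- ===== Notes on version B (the rewrite author's own statement) =====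
-- stated objective: alternative
-- what changed: B computes each hash as a closed-form masked polynomial sum instead of the charAdd recurrence, drops the else branch by accumulating 2*freq only on set bits, and subtracts the total frequency from every slot once at the end (freq*(set?+1:-1) = 2*freq*set - total).
import Mathlib
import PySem

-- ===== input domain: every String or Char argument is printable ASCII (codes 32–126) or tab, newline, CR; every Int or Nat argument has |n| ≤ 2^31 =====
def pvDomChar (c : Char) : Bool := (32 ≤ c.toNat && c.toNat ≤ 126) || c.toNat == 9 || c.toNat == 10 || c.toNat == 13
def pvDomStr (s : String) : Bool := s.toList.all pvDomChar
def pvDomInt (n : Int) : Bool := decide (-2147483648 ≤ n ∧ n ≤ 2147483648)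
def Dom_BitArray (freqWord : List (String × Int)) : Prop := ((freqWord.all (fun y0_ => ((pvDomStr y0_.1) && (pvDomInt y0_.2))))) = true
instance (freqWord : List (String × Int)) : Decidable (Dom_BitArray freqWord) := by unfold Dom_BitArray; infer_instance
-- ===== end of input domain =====

-- B replaces the charAdd recurrence by a closed-form masked polynomial sum, drops the
-- else branch (adding 2*freq only on set bits) and subtracts the total frequency once
-- at the end; objective: alternative decomposition (same asymptotic cost).

-- ===== PORT A =====
-- All Python ints here are nonnegative, so `x & (2^64 - 1)` is exactly `x % 2^64` (Nat).
def charAdd (currVal : Nat) (currPow : Nat) (ch : Char) : Nat × Nat :=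
  let b := 53
  let last := 2 ^ 64
  let asciNum := ch.toNat
  let newVal := (currVal + asciNum * currPow) % last
  let newPow := (currPow * b) % last
  (newVal, newPow)

def polyHash (word : String) : Nat :=
  (word.toList.foldl (fun vp letter => charAdd vp.1 vp.2 letter) (0, 1)).1

def BitArray (freqWord : List (String × Int)) : List Int :=
  freqWord.foldl (fun bit wf =>
    let Wordhash := polyHash wf.1
    -- while i < 64: ported as a fold over the indices 0,…,63
    (List.range 64).foldl (fun bit i =>
      let bitVal := Wordhash &&& (1 <<< i)
      if bitVal ≠ 0 then bit.set i (bit.getD i 0 + wf.2)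
      else bit.set i (bit.getD i 0 - wf.2)) bit)
    (List.replicate 64 0)

-- ===== PORT B =====
-- `enumerate(word)` is ported as `zipIdx` (pairs (char, index)); the `& mask` on the
-- nonnegative sum is `% 2^64`.
def BitArray_alt (freqWord : List (String × Int)) : List Int :=
  let total := (freqWord.map (fun wf => wf.2)).sum
  let bit := freqWord.foldl (fun bit wf =>
    let h := ((wf.1.toList.zipIdx.map (fun ci => ci.1.toNat * 53 ^ ci.2)).sum) % 2 ^ 64
    (List.range 64).foldl (fun bit i =>
      if (h >>> i) &&& 1 ≠ 0 then bit.set i (bit.getD i 0 + 2 * wf.2) else bit) bit)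
    (List.replicate 64 0)
  bit.map (fun b => b - total)

-- ===== PRECONDITION & SPEC =====
def Spec_BitArray (freqWord : List (String × Int)) (out : List Int) : Prop := out = BitArray_alt freqWord
instance (freqWord : List (String × Int)) (out : List Int) : Decidable (Spec_BitArray freqWord out) := by unfold Spec_BitArray; infer_instance

-- ===== CLAIM (what is proved, stated in full; the proofs are below) =====
def Claim_equal_BitArray : Prop := ∀ (freqWord : List (String × Int)), Dom_BitArray freqWord → Spec_BitArray freqWord (BitArray freqWord)

-- ===== LEMMAS AND PROOFS =====

-- the per-word steps of the two ports, named for the proofs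
def stepA (bit : List Int) (wf : String × Int) : List Int :=
  let Wordhash := polyHash wf.1
  (List.range 64).foldl (fun bit i =>
    let bitVal := Wordhash &&& (1 <<< i)
    if bitVal ≠ 0 then bit.set i (bit.getD i 0 + wf.2)
    else bit.set i (bit.getD i 0 - wf.2)) bit

def stepB (bit : List Int) (wf : String × Int) : List Int :=
  let h := ((wf.1.toList.zipIdx.map (fun ci => ci.1.toNat * 53 ^ ci.2)).sum) % 2 ^ 64
  (List.range 64).foldl (fun bit i =>
    if (h >>> i) &&& 1 ≠ 0 then bit.set i (bit.getD i 0 + 2 * wf.2) else bit) bit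

theorem BitArray_eq_fold (l : List (String × Int)) :
    BitArray l = l.foldl stepA (List.replicate 64 0) := rfl

theorem BitArray_alt_eq_fold (l : List (String × Int)) :
    BitArray_alt l = (l.foldl stepB (List.replicate 64 0)).map
      (fun b => b - (l.map (fun wf => wf.2)).sum) := rfl

-- the exact integer polynomial of a word
def polyN : List Char → Nat
  | [] => 0
  | c :: cs => c.toNat + 53 * polyN cs

theorem zipIdx_sum (cs : List Char) (k : Nat) :
    ((cs.zipIdx k).map (fun ci => ci.1.toNat * 53 ^ ci.2)).sum = 53 ^ k * polyN cs := by
  induction cs generalizing k with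
  | nil => simp [polyN]
  | cons c cs ih => simp [List.zipIdx_cons, polyN, ih, pow_succ]; ring

theorem fold_charAdd (cs : List Char) (v p : Nat) :
    (cs.foldl (fun vp letter => charAdd vp.1 vp.2 letter) (v % 2 ^ 64, p % 2 ^ 64)).1
      = (v + p * polyN cs) % 2 ^ 64 := by
  induction cs generalizing v p with
  | nil => simp [polyN]
  | cons c cs ih =>
    have h1 : (v % 2 ^ 64 + c.toNat * (p % 2 ^ 64)) % 2 ^ 64 = (v + c.toNat * p) % 2 ^ 64 :=
      (Nat.mod_modEq v (2 ^ 64)).add ((Nat.ModEq.refl c.toNat).mul (Nat.mod_modEq p (2 ^ 64)))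
    have h2 : (p % 2 ^ 64 * 53) % 2 ^ 64 = (p * 53) % 2 ^ 64 :=
      ((Nat.mod_modEq p (2 ^ 64)).mul (Nat.ModEq.refl 53))
    rw [List.foldl_cons]
    rw [show charAdd (v % 2 ^ 64, p % 2 ^ 64).1 (v % 2 ^ 64, p % 2 ^ 64).2 c
        = ((v + c.toNat * p) % 2 ^ 64, (p * 53) % 2 ^ 64) from by
      show ((v % 2 ^ 64 + c.toNat * (p % 2 ^ 64)) % 2 ^ 64, (p % 2 ^ 64) * 53 % 2 ^ 64) = _
      rw [h1, h2]]
    rw [ih (v + c.toNat * p) (p * 53)]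
    congr 1
    simp [polyN]; ring

theorem polyHash_eq (w : String) : polyHash w = polyN w.toList % 2 ^ 64 := by
  have := fold_charAdd w.toList 0 1
  simpa [polyHash] using this

theorem hashB_eq (w : String) :
    ((w.toList.zipIdx.map (fun ci => ci.1.toNat * 53 ^ ci.2)).sum) % 2 ^ 64
      = polyN w.toList % 2 ^ 64 := by
  rw [zipIdx_sum w.toList 0]; simp

theorem shiftRight_and_one (h i : Nat) : (h >>> i) &&& 1 = (h.testBit i).toNat := by
  simp [Nat.testBit, Nat.and_one_is_mod, Nat.shiftRight_eq_div_pow]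
  rcases Nat.mod_two_eq_zero_or_one (h / 2 ^ i) with h' | h' <;> simp [h']

theorem and_shift_ne (h i : Nat) : (h &&& (1 <<< i) ≠ 0) ↔ h.testBit i = true := by
  rw [Nat.shiftLeft_eq, one_mul, Nat.and_two_pow]
  cases hb : h.testBit i <;> simp [hb]

theorem shift_and_ne (h i : Nat) : ((h >>> i) &&& 1 ≠ 0) ↔ h.testBit i = true := by
  rw [shiftRight_and_one]
  cases hb : h.testBit i <;> simp

-- generic lemmas for the inner index fold
theorem fold_len (step : List Int → Nat → List Int)
    (h : ∀ bit i, (step bit i).length = bit.length) (l : List Nat) (bit : List Int) :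
    (l.foldl step bit).length = bit.length := by
  induction l generalizing bit with
  | nil => rfl
  | cons x l ih => simp [List.foldl_cons, ih, h]

theorem fold_range_getD (step : List Int → Nat → List Int) (F : Nat → Int → Int)
    (hlen : ∀ bit i, (step bit i).length = bit.length)
    (hget : ∀ (bit : List Int) (i j : Nat), i < bit.length →
      (step bit i).getD j 0 = if j = i then F i (bit.getD j 0) else bit.getD j 0)
    (n : Nat) (bit : List Int) (hn : n ≤ bit.length) (j : Nat) :
    ((List.range n).foldl step bit).getD j 0
      = if j < n then F j (bit.getD j 0) else bit.getD j 0 := by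
  induction n with
  | zero => simp
  | succ n ih =>
    rw [List.range_succ, List.foldl_append, List.foldl_cons, List.foldl_nil]
    have hlen' : ((List.range n).foldl step bit).length = bit.length := fold_len step hlen _ _
    rw [hget _ n j (by omega)]
    by_cases hj : j = n
    · subst hj
      rw [ih (by omega)]
      simp
    · rw [ih (by omega)]
      by_cases hj2 : j < n
      · have h3 : j < n + 1 := by omega
        simp [hj, hj2, h3]
      · have h3 : ¬ j < n + 1 := by omega
        simp [hj, hj2, h3]

-- per-word characterisations
theorem stepA_len (bit : List Int) (wf : String × Int) : (stepA bit wf).length = bit.length := by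
  unfold stepA
  exact fold_len _ (fun bit i => by dsimp only; split <;> simp) _ _

theorem stepB_len (bit : List Int) (wf : String × Int) : (stepB bit wf).length = bit.length := by
  unfold stepB
  exact fold_len _ (fun bit i => by split <;> simp) _ _

theorem getD_set_ne (bit : List Int) (i j : Nat) (v : Int) (h : j ≠ i) :
    (bit.set i v).getD j 0 = bit.getD j 0 := by
  have h' : i ≠ j := fun h' => h h'.symm
  simp [List.getD_eq_getElem?_getD, List.getElem?_set, h']

theorem getD_set_self (bit : List Int) (i : Nat) (v : Int) (h : i < bit.length) :
    (bit.set i v).getD i 0 = v := by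
  simp [List.getD_eq_getElem?_getD, List.getElem?_set, h]

theorem stepA_getD (bit : List Int) (wf : String × Int) (hlen : bit.length = 64) (j : Nat) (hj : j < 64) :
    (stepA bit wf).getD j 0 = bit.getD j 0 +
      (if (polyN wf.1.toList % 2 ^ 64).testBit j then wf.2 else -wf.2) := by
  unfold stepA
  rw [fold_range_getD _ (fun i x => x + (if (polyN wf.1.toList % 2 ^ 64).testBit i then wf.2 else -wf.2))
    (fun bit i => by dsimp only; split <;> simp)
    (fun bit i j hi => ?_) 64 bit (by omega) j]
  · simp [hj]
  · dsimp only
    by_cases h : polyHash wf.1 &&& (1 <<< i) ≠ 0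
    · have hb : (polyN wf.1.toList % 2 ^ 64).testBit i = true := by
        rw [← polyHash_eq]; exact (and_shift_ne _ _).mp h
      rw [if_pos h, hb]
      by_cases hji : j = i
      · subst hji
        rw [getD_set_self bit j _ hi, if_pos rfl, if_pos rfl]
      · rw [getD_set_ne bit i j _ hji, if_neg hji]
    · have hb : (polyN wf.1.toList % 2 ^ 64).testBit i = false := by
        rw [← polyHash_eq]
        cases hb' : (polyHash wf.1).testBit i
        · rfl
        · exact absurd ((and_shift_ne _ _).mpr hb') h
      rw [if_neg h, hb]
      by_cases hji : j = i
      · subst hji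
        rw [getD_set_self bit j _ hi, if_pos rfl, if_neg (by simp)]
        ring
      · rw [getD_set_ne bit i j _ hji, if_neg hji]

theorem stepB_getD (bit : List Int) (wf : String × Int) (hlen : bit.length = 64) (j : Nat) (hj : j < 64) :
    (stepB bit wf).getD j 0 = bit.getD j 0 +
      (if (polyN wf.1.toList % 2 ^ 64).testBit j then 2 * wf.2 else 0) := by
  unfold stepB
  rw [fold_range_getD _ (fun i x => x + (if (polyN wf.1.toList % 2 ^ 64).testBit i then 2 * wf.2 else 0))
    (fun bit i => by split <;> simp)
    (fun bit i j hi => ?_) 64 bit (by omega) j]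
  · simp [hj]
  · dsimp only
    by_cases h : (((((wf.1.toList.zipIdx.map (fun ci => ci.1.toNat * 53 ^ ci.2)).sum) % 2 ^ 64) >>> i) &&& 1 ≠ 0)
    · have hb : (polyN wf.1.toList % 2 ^ 64).testBit i = true := by
        rw [← hashB_eq]; exact (shift_and_ne _ _).mp h
      rw [if_pos h, hb]
      by_cases hji : j = i
      · subst hji
        rw [getD_set_self bit j _ hi, if_pos rfl, if_pos rfl]
      · rw [getD_set_ne bit i j _ hji, if_neg hji]
    · have hb : (polyN wf.1.toList % 2 ^ 64).testBit i = false := by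
        rw [← hashB_eq]
        cases hb' : (((wf.1.toList.zipIdx.map (fun (ci : Char × Nat) => ci.1.toNat * 53 ^ ci.2)).sum) % 2 ^ 64).testBit i
        · rfl
        · exact absurd ((shift_and_ne _ _).mpr hb') h
      rw [if_neg h, hb]
      by_cases hji : j = i
      · subst hji
        rw [if_pos rfl, if_neg (by simp)]
        ring
      · rw [if_neg hji]

-- per-index contributions of the whole list
def contribA (l : List (String × Int)) (j : Nat) : Int :=
  (l.map (fun wf => if (polyN wf.1.toList % 2 ^ 64).testBit j then wf.2 else -wf.2)).sum

def contribB (l : List (String × Int)) (j : Nat) : Int :=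
  (l.map (fun wf => if (polyN wf.1.toList % 2 ^ 64).testBit j then 2 * wf.2 else 0)).sum

theorem foldA_len (l : List (String × Int)) (bit : List Int) :
    (l.foldl stepA bit).length = bit.length := by
  induction l generalizing bit with
  | nil => rfl
  | cons x l ih => simp [List.foldl_cons, ih, stepA_len]

theorem foldB_len (l : List (String × Int)) (bit : List Int) :
    (l.foldl stepB bit).length = bit.length := by
  induction l generalizing bit with
  | nil => rfl
  | cons x l ih => simp [List.foldl_cons, ih, stepB_len]

theorem foldA_getD (l : List (String × Int)) (bit : List Int) (hlen : bit.length = 64)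
    (j : Nat) (hj : j < 64) :
    (l.foldl stepA bit).getD j 0 = bit.getD j 0 + contribA l j := by
  induction l generalizing bit with
  | nil => simp [contribA]
  | cons x l ih =>
    rw [List.foldl_cons, ih _ (by rw [stepA_len]; exact hlen), stepA_getD bit x hlen j hj]
    simp [contribA]; ring

theorem foldB_getD (l : List (String × Int)) (bit : List Int) (hlen : bit.length = 64)
    (j : Nat) (hj : j < 64) :
    (l.foldl stepB bit).getD j 0 = bit.getD j 0 + contribB l j := by
  induction l generalizing bit with
  | nil => simp [contribB]
  | cons x l ih =>
    rw [List.foldl_cons, ih _ (by rw [stepB_len]; exact hlen), stepB_getD bit x hlen j hj]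
    simp [contribB]; ring

theorem contrib_rel (l : List (String × Int)) (j : Nat) :
    contribA l j = contribB l j - (l.map (fun wf => wf.2)).sum := by
  induction l with
  | nil => simp [contribA, contribB]
  | cons x l ih =>
    simp only [contribA, contribB, List.map_cons, List.sum_cons] at *
    rw [ih]
    by_cases h : (polyN x.1.toList % 2 ^ 64).testBit j
    · rw [if_pos h, if_pos h]; ring
    · rw [if_neg h, if_neg h]; ring

-- ===== VERDICT (by name: the statement is the Claim_ definition above) =====
theorem BitArray_spec : Claim_equal_BitArray := by
  intro l _
  show BitArray l = BitArray_alt l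
  rw [BitArray_eq_fold, BitArray_alt_eq_fold]
  have hA : (l.foldl stepA (List.replicate 64 0)).length = 64 := by
    rw [foldA_len]; simp
  have hB : (l.foldl stepB (List.replicate 64 0)).length = 64 := by
    rw [foldB_len]; simp
  apply List.ext_getElem
  · rw [List.length_map, hA, hB]
  · intro j h1 h2
    rw [← List.getD_eq_getElem _ 0 h1]
    have hj : j < 64 := by rw [hA] at h1; exact h1
    have hg : ((l.foldl stepB (List.replicate 64 0)).map
        (fun b => b - (l.map (fun wf => wf.2)).sum))[j] =
        (l.foldl stepB (List.replicate 64 0)).getD j 0 - (l.map (fun wf => wf.2)).sum := by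
      rw [List.getElem_map, ← List.getD_eq_getElem _ 0 (by rw [hB]; exact hj)]
    rw [hg, foldA_getD l _ (by simp) j hj, foldB_getD l _ (by simp) j hj,
      contrib_rel l j]
    ring
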